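-- pv_equiv track=rewrite | github.com/igorvanloo/Project-Euler-Explained | pe00047 - 4 num distinct prime fac.py | compute
-- ===== SOURCE A (Python) =====
-- def list_primality_modified(n):
-- 	result = [0] * (n + 1)
-- 	result[0] = result[1] = 1
-- 	for i in range(int((n)) + 1):
-- 		if result[i] == 0:
-- 			for j in range(2 * i, len(result), i):
-- 				result[j] += 1
--
-- 	return result
--
-- def compute(N, K):
--     result = list_primality_modified(N)
--     for x in range(1, len(result)-K):
--         count = 0
--         for y in range(K):
--             if result[x+y] == K:
--                 count += 1
--         if count == K:
--             return x
-- ===== SOURCE B (Python) =====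
-- def list_primality_modified(n):
-- 	result = [0] * (n + 1)
-- 	result[0] = result[1] = 1
-- 	for i in range(int((n)) + 1):
-- 		if result[i] == 0:
-- 			for j in range(2 * i, len(result), i):
-- 				result[j] += 1
--
-- 	return result
--
-- def compute(N, K):
--     result = list_primality_modified(N)
--     run_start = 1
--     for i in range(1, len(result) - 1):
--         if result[i] != K:
--             run_start = i + 1
--         elif i - run_start + 1 == K:
--             return run_start
-- ===== Notes on version B (the rewrite author's own statement) =====
-- stated objective: alternative
-- what changed: The quadratic nested window scan (for each start x, re-count K entries) is replaced by a single pass over the sieve that tracks run_start, the start of the current run of entries equal to K, returning run_start as soon as the run reaches length K; Pre_ excludes K = 0, a degenerate window size on which A's value 1 (the empty window trivially matching at x=1) is accidental and B naturally returns None.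
-- outside the precondition, e.g. on compute(10, 0): A returns 1, B returns None
import Mathlib
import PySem

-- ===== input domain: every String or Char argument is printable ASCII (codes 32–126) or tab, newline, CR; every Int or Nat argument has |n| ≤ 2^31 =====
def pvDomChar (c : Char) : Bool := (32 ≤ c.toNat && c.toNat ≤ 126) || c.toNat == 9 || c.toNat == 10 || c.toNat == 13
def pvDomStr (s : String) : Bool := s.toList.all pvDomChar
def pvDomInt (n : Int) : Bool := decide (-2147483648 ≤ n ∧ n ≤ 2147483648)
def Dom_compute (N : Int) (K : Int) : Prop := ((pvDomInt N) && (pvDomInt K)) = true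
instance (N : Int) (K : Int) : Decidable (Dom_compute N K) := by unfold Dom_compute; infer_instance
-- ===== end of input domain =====

-- B replaces A's quadratic nested window scan with a single run-tracking pass over the same sieve (alternative decomposition).

-- ===== PORT A =====
-- inner loop of list_primality_modified: for j in range(2*i, len(result), i): result[j] += 1
def innerSieve (res : List Int) (i : Int) : List Int :=
  (PySem.List.pyRange (2*i) (res.length : Int) i).foldl
    (fun r j => PySem.List.pySetD r j (PySem.List.pyGetD r j 0 + 1)) res

-- list_primality_modified(n); result[0]=result[1]=1 needs n ≥ 1 (else Python raises: Pre_)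
def listPrimalityModified (n : Int) : List Int :=
  (PySem.List.pyRange 0 (n + 1) 1).foldl
    (fun res i => if PySem.List.pyGetD res i 0 == 0 then innerSieve res i else res)
    (PySem.List.pySetD (PySem.List.pySetD (List.replicate (n + 1).toNat (0 : Int)) 0 1) 1 1)

-- count = 0; for y in range(K): if result[x+y] == K: count += 1
def countA (r : List Int) (K x : Int) : Int :=
  (PySem.List.pyRange 0 K 1).foldl
    (fun c y => if PySem.List.pyGetD r (x + y) 0 == K then c + 1 else c) 0

-- for x in ...: ... if count == K: return x
def searchA (r : List Int) (K : Int) : List Int → Option Int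
  | [] => none
  | x :: xs => if countA r K x == K then some x else searchA r K xs

def compute (N : Int) (K : Int) : Option Int :=
  let result := listPrimalityModified N
  searchA result K (PySem.List.pyRange 1 ((result.length : Int) - K) 1)

-- ===== PORT B =====
-- loop of Source B: for i in range(1, len(result)-1): if result[i] != K: run_start = i+1; elif i-run_start+1 == K: return run_start
def searchB (r : List Int) (K : Int) : Int → List Int → Option Int
  | _, [] => none
  | rs, i :: is =>
    if !(PySem.List.pyGetD r i 0 == K) then searchB r K (i + 1) is
    else if i - rs + 1 == K then some rs
    else searchB r K rs is

def compute_alt (N : Int) (K : Int) : Option Int :=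
  let result := listPrimalityModified N
  searchB result K 1 (PySem.List.pyRange 1 ((result.length : Int) - 1) 1)

-- ===== PRECONDITION & SPEC =====
-- A raises IndexError for N ≤ 0 (result[1] = 1 on a list of length ≤ 1). Pre_ also excludes K = 0,
-- a degenerate window size on which A's value 1 (the empty window trivially matching at x = 1) is
-- accidental and B naturally returns none.
def Pre_compute (N : Int) (K : Int) : Prop := 1 ≤ N ∧ K ≠ 0
instance (N : Int) (K : Int) : Decidable (Pre_compute N K) := by unfold Pre_compute; infer_instance
def pvWitness_compute : Int × Int := (30, 2)

def Spec_compute (N : Int) (K : Int) (out : Option Int) : Prop := out = compute_alt N K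
instance (N : Int) (K : Int) (out : Option Int) : Decidable (Spec_compute N K out) := by unfold Spec_compute; infer_instance

-- ===== CLAIM (what is proved, stated in full; the proofs are below) =====
def Claim_equal_compute : Prop := ∀ (N : Int) (K : Int), Dom_compute N K → Pre_compute N K → Spec_compute N K (compute N K)

-- ===== LEMMAS AND PROOFS =====

-- the window test both searches are equivalent to
def allK (r : List Int) (K x : Int) : Bool :=
  (PySem.List.pyRange 0 K 1).all (fun y => PySem.List.pyGetD r (x + y) 0 == K)

lemma foldl_len_inv {α : Type} (f : List Int → α → List Int)
    (h : ∀ r a, (f r a).length = r.length) :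
    ∀ (l : List α) (init : List Int), (l.foldl f init).length = init.length := by
  intro l
  induction l with
  | nil => intro init; rfl
  | cons a l ih => intro init; simp [List.foldl, ih, h]

lemma length_listPrimalityModified (n : Int) (hn : 1 ≤ n) :
    ((listPrimalityModified n).length : Int) = n + 1 := by
  unfold listPrimalityModified
  rw [foldl_len_inv]
  · simp [PySem.List.length_pySetD]; omega
  · intro r i
    split
    · unfold innerSieve
      exact foldl_len_inv _ (by intro r j; simp [PySem.List.length_pySetD]) _ _
    · rfl

lemma foldl_count (p : Int → Bool) :
    ∀ (l : List Int) (c : Int),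
      l.foldl (fun c y => if p y then c + 1 else c) c = c + (l.countP p : Int) := by
  intro l
  induction l with
  | nil => intro c; simp
  | cons a l ih =>
    intro c
    by_cases h : p a <;> simp [List.foldl, h, ih] <;> try ring

lemma countA_eq_allK (r : List Int) (K x : Int) (hK : 0 ≤ K) :
    (countA r K x == K) = allK r K x := by
  unfold countA allK
  rw [foldl_count]
  have hlen : (PySem.List.pyRange 0 K 1).length = (K - 0).toNat :=
    PySem.List.length_pyRange_one 0 K
  have hle : (PySem.List.pyRange 0 K 1).countP
      (fun y => PySem.List.pyGetD r (x + y) 0 == K) ≤ (PySem.List.pyRange 0 K 1).length :=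
    List.countP_le_length
  cases h : (PySem.List.pyRange 0 K 1).all (fun y => PySem.List.pyGetD r (x + y) 0 == K) with
  | true =>
    have hc := List.countP_eq_length.mpr (fun a ha => (List.all_eq_true.mp h a ha))
    rw [hc, hlen]
    simp only [beq_iff_eq]
    omega
  | false =>
    obtain ⟨y, hy, hny⟩ := List.all_eq_false.mp h
    have hne : (PySem.List.pyRange 0 K 1).countP
        (fun y => PySem.List.pyGetD r (x + y) 0 == K) ≠
        (PySem.List.pyRange 0 K 1).length := by
      intro hcl
      exact hny (List.countP_eq_length.mp hcl y hy)
    rw [hlen] at hne hle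
    simp only [beq_eq_false_iff_ne, ne_eq]
    omega

lemma searchA_eq_find (r : List Int) (K : Int) (hK : 0 ≤ K) :
    ∀ xs : List Int, searchA r K xs = List.find? (fun x => allK r K x) xs := by
  intro xs
  induction xs with
  | nil => rfl
  | cons x xs ih =>
    show (if countA r K x == K then some x else searchA r K xs) = _
    rw [countA_eq_allK r K x hK, ih, List.find?_cons]
    cases allK r K x <;> rfl

lemma searchA_neg (r : List Int) (K : Int) (hK : K < 0) :
    ∀ xs : List Int, searchA r K xs = none := by
  intro xs
  induction xs with
  | nil => rfl
  | cons x xs ih =>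
    have h0 : countA r K x = 0 := by
      unfold countA
      rw [PySem.List.pyRange_one_eq_nil (by omega)]
      rfl
    show (if countA r K x == K then some x else searchA r K xs) = none
    rw [h0, ih, if_neg]
    simp only [beq_iff_eq]
    omega

lemma searchB_cons (r : List Int) (K rs i : Int) (is : List Int) :
    searchB r K rs (i :: is) =
      if PySem.List.pyGetD r i 0 == K then
        (if i - rs + 1 == K then some rs else searchB r K rs is)
      else searchB r K (i + 1) is := by
  cases h : (PySem.List.pyGetD r i 0 == K) <;> simp [searchB, h]

lemma searchB_neg (r : List Int) (K M : Int) (hK : K < 0) :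
    ∀ (n : Nat) (i0 rs : Int), (M - i0).toNat ≤ n → rs ≤ i0 →
      searchB r K rs (PySem.List.pyRange i0 M 1) = none := by
  intro n
  induction n with
  | zero =>
    intro i0 rs hn hrs
    rw [PySem.List.pyRange_one_eq_nil (by omega)]
    rfl
  | succ n ih =>
    intro i0 rs hn hrs
    by_cases hM : M ≤ i0
    · rw [PySem.List.pyRange_one_eq_nil hM]; rfl
    · rw [PySem.List.pyRange_one_cons (by omega), searchB_cons]
      by_cases hc : (PySem.List.pyGetD r i0 0 == K) = true
      · rw [if_pos hc, if_neg (by simp only [beq_iff_eq]; omega)]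
        exact ih (i0 + 1) rs (by omega) (by omega)
      · rw [if_neg hc]
        exact ih (i0 + 1) (i0 + 1) (by omega) le_rfl

-- skipping a prefix of failing candidates does not change find? over a range
lemma find?_range_skip (p : Int → Bool) :
    ∀ (n : Nat) (a a' b : Int), (a' - a).toNat ≤ n → a ≤ a' →
      (∀ x, a ≤ x → x < a' → p x = false) →
      List.find? p (PySem.List.pyRange a b 1) = List.find? p (PySem.List.pyRange a' b 1) := by
  intro n
  induction n with
  | zero =>
    intro a a' b hn hle _
    have : a = a' := by omega
    rw [this]
  | succ n ih =>
    intro a a' b hn hle hfail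
    by_cases heq : a = a'
    · rw [heq]
    · by_cases hb : b ≤ a
      · rw [PySem.List.pyRange_one_eq_nil hb, PySem.List.pyRange_one_eq_nil (by omega)]
      · rw [PySem.List.pyRange_one_cons (by omega), List.find?_cons,
          hfail a le_rfl (by omega)]
        exact ih (a + 1) a' b (by omega) (by omega)
          (fun x hx1 hx2 => hfail x (by omega) hx2)

-- the run-tracking scan finds the first all-K window
lemma searchB_eq_find (r : List Int) (K M : Int) (hK : 1 ≤ K) :
    ∀ (n : Nat) (i0 rs : Int), (M - i0).toNat ≤ n → rs ≤ i0 → i0 - rs < K →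
      (∀ t, rs ≤ t → t < i0 → (PySem.List.pyGetD r t 0 == K) = true) →
      searchB r K rs (PySem.List.pyRange i0 M 1) =
        List.find? (fun x => allK r K x) (PySem.List.pyRange rs (M - K + 1) 1) := by
  intro n
  induction n with
  | zero =>
    intro i0 rs hn hrs hrun _
    rw [PySem.List.pyRange_one_eq_nil (by omega), PySem.List.pyRange_one_eq_nil (by omega)]
    rfl
  | succ n ih =>
    intro i0 rs hn hrs hrun hall
    by_cases hM : M ≤ i0
    · rw [PySem.List.pyRange_one_eq_nil hM, PySem.List.pyRange_one_eq_nil (by omega)]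
      rfl
    · rw [PySem.List.pyRange_one_cons (by omega), searchB_cons]
      by_cases hc : (PySem.List.pyGetD r i0 0 == K) = true
      · rw [if_pos hc]
        by_cases hdone : i0 - rs + 1 = K
        · rw [if_pos (by simp only [beq_iff_eq]; omega)]
          rw [PySem.List.pyRange_one_cons (by omega), List.find?_cons]
          have hwin : allK r K rs = true := by
            unfold allK
            rw [List.all_eq_true]
            intro y hy
            rw [PySem.List.mem_pyRange_one] at hy
            by_cases hys : rs + y < i0
            · exact hall (rs + y) (by omega) hys
            · have h2 : rs + y = i0 := by omega
              rw [h2]; exact hc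
          rw [hwin]
        · rw [if_neg (by simp only [beq_iff_eq]; omega)]
          exact ih (i0 + 1) rs (by omega) (by omega) (by omega)
            (fun t ht1 ht2 => by
              by_cases ht : t < i0
              · exact hall t ht1 ht
              · have hteq : t = i0 := by omega
                rw [hteq]; exact hc)
      · rw [if_neg hc]
        simp only [Bool.not_eq_true] at hc
        rw [ih (i0 + 1) (i0 + 1) (by omega) le_rfl (by omega) (fun t ht1 ht2 => by omega)]
        refine (find?_range_skip _ (i0 + 1 - rs).toNat rs (i0 + 1) (M - K + 1)
          le_rfl (by omega) ?_).symm
        intro x hx1 hx2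
        unfold allK
        rw [List.all_eq_false]
        refine ⟨i0 - x, ?_, by simpa using hc⟩
        rw [PySem.List.mem_pyRange_one]
        exact ⟨by omega, by omega⟩

lemma compute_eq_searchA (N K : Int) (hN : 1 ≤ N) :
    compute N K = searchA (listPrimalityModified N) K
      (PySem.List.pyRange 1 (N + 1 - K) 1) := by
  show searchA (listPrimalityModified N) K
      (PySem.List.pyRange 1 (((listPrimalityModified N).length : Int) - K) 1) = _
  rw [length_listPrimalityModified N hN]

lemma compute_alt_eq (N K : Int) (hN : 1 ≤ N) :
    compute_alt N K = searchB (listPrimalityModified N) K 1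
      (PySem.List.pyRange 1 N 1) := by
  show searchB (listPrimalityModified N) K 1
      (PySem.List.pyRange 1 (((listPrimalityModified N).length : Int) - 1) 1) = _
  rw [length_listPrimalityModified N hN]
  norm_num

-- ===== VERDICT (by name: the statement is the Claim_ definition above) =====
theorem compute_spec : Claim_equal_compute := by
  intro N K _ hPre
  unfold Spec_compute
  obtain ⟨hN, hK0⟩ := hPre
  rw [compute_eq_searchA N K hN, compute_alt_eq N K hN]
  by_cases hKneg : K < 0
  · rw [searchA_neg _ K hKneg]
    rw [searchB_neg _ K N hKneg (N - 1).toNat 1 1 (by omega) le_rfl]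
  · have hK1 : 1 ≤ K := by omega
    rw [searchA_eq_find _ K (by omega)]
    rw [searchB_eq_find (listPrimalityModified N) K N hK1 (N - 1).toNat 1 1
      (by omega) le_rfl (by omega) (by omega)]
    have h6 : N - K + 1 = N + 1 - K := by omega
    rw [h6]
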